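-- pv_equiv track=rewrite | github.com/fabi01a/MASTERMIND_GAME | app/utils/guess_evaluation.py | get_partial_matches
-- ===== SOURCE A (Python) =====
-- def get_partial_matches(player_guess, secret_code, secret_matched, guess_matched, code_length):
--     correct_numbers = 0
--     for i in range(code_length):
--         if guess_matched[i]:
--             continue
--         for j in range(code_length):
--             if not secret_matched[j] and player_guess[i] == secret_code[j]:
--                 correct_numbers += 1
--                 secret_matched[j] = True
--                 guess_matched[i] = True
--                 break
--     return correct_numbers
-- ===== SOURCE B (Python) =====
-- def get_partial_matches(player_guess, secret_code, secret_matched, guess_matched, code_length):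
--     # One pass: count the available (unmatched) secret values, then consume
--     # them greedily while scanning the guess positions in order.
--     counts = {}
--     for j in range(code_length):
--         if not secret_matched[j]:
--             v = secret_code[j]
--             counts[v] = counts.get(v, 0) + 1
--     correct_numbers = 0
--     for i in range(code_length):
--         if not guess_matched[i]:
--             v = player_guess[i]
--             if counts.get(v, 0) > 0:
--                 counts[v] -= 1
--                 correct_numbers += 1
--     return correct_numbers
-- ===== Notes on version B (the rewrite author's own statement) =====
-- stated objective: faster
-- what changed: Replaces the nested scan over secret positions by a hash counter of unmatched secret values built once and consumed greedily in a single pass over the guess.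
-- outside the precondition, e.g. on get_partial_matches([], [], [], [True], 1): A returns 0, B raises IndexError
import Mathlib
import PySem

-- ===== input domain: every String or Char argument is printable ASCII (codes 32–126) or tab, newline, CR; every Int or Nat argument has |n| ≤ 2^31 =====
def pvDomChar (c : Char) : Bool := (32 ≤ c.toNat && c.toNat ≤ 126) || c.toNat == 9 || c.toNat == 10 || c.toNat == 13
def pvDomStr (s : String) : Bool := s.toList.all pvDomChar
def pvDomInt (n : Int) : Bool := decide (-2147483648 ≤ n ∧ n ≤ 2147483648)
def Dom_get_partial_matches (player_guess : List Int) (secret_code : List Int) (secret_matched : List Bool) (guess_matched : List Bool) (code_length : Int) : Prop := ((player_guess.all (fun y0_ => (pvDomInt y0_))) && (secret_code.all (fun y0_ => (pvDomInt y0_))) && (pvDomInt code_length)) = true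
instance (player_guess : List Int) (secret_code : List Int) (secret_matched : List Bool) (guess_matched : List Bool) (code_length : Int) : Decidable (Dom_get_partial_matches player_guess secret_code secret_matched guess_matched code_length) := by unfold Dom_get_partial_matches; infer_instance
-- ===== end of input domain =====

-- B replaces A's quadratic nested scan by a hash counter of unmatched secret values,
-- consumed greedily in one pass over the guess (O(n)); equivalence is about the RETURN
-- value only: A mutates secret_matched/guess_matched in place, B does not.

-- ===== PORT A =====
-- inner 'for j in range(code_length): … break': returns the updated secret_matched
-- on the first match (= break), none if the loop falls through.
def pvInnerA (v : Int) (secret : List Int) (sm : List Bool) : List Int → Option (List Bool)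
  | [] => none
  | j :: rest =>
    if !(PySem.List.pyGetD sm j false) && (PySem.List.pyGetD secret j 0 == v) then
      some (PySem.List.pySetD sm j true)
    else pvInnerA v secret sm rest

-- outer 'for i in range(code_length)' with state (correct_numbers, secret_matched, guess_matched)
def pvOuterA (guess secret : List Int) (cl : Int) : Int × List Bool × List Bool → List Int → Int × List Bool × List Bool
  | st, [] => st
  | (cnt, sm, gm), i :: rest =>
    if PySem.List.pyGetD gm i false then pvOuterA guess secret cl (cnt, sm, gm) rest
    else
      match pvInnerA (PySem.List.pyGetD guess i 0) secret sm (PySem.List.pyRange 0 cl 1) with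
      | none => pvOuterA guess secret cl (cnt, sm, gm) rest
      | some sm' => pvOuterA guess secret cl (cnt + 1, sm', PySem.List.pySetD gm i true) rest

def get_partial_matches (player_guess : List Int) (secret_code : List Int) (secret_matched : List Bool) (guess_matched : List Bool) (code_length : Int) : Int :=
  (pvOuterA player_guess secret_code code_length (0, secret_matched, guess_matched)
    (PySem.List.pyRange 0 code_length 1)).1

-- ===== PORT B =====
-- counts = {}; for j in range(code_length): if not secret_matched[j]: counts[v] = counts.get(v,0)+1
def pvCountsB (secret : List Int) (sm : List Bool) (cl : Int) : PySem.Dict Int Int :=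
  (PySem.List.pyRange 0 cl 1).foldl (fun c j =>
    if !(PySem.List.pyGetD sm j false) then
      c.insert (PySem.List.pyGetD secret j 0) (c.getD (PySem.List.pyGetD secret j 0) 0 + 1)
    else c) PySem.Dict.empty

def get_partial_matches_alt (player_guess : List Int) (secret_code : List Int) (secret_matched : List Bool) (guess_matched : List Bool) (code_length : Int) : Int :=
  ((PySem.List.pyRange 0 code_length 1).foldl (fun (st : Int × PySem.Dict Int Int) i =>
      if !(PySem.List.pyGetD guess_matched i false) then
        if st.2.getD (PySem.List.pyGetD player_guess i 0) 0 > 0 then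
          (st.1 + 1, st.2.insert (PySem.List.pyGetD player_guess i 0)
                        (st.2.getD (PySem.List.pyGetD player_guess i 0) 0 - 1))
        else st
      else st)
    (0, pvCountsB secret_code secret_matched code_length)).1

-- ===== PRECONDITION & SPEC =====
-- Pre_ excludes out-of-range code_length (Python A raises IndexError there, except when
-- every reachable index happens to be skipped by an early guess_matched flag — on those
-- accidental inputs B's own indexing raises, see claim cites).
def Pre_get_partial_matches (player_guess : List Int) (secret_code : List Int) (secret_matched : List Bool) (guess_matched : List Bool) (code_length : Int) : Prop :=
  code_length ≤ (player_guess.length : Int) ∧ code_length ≤ (secret_code.length : Int) ∧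
  code_length ≤ (secret_matched.length : Int) ∧ code_length ≤ (guess_matched.length : Int)
instance (player_guess : List Int) (secret_code : List Int) (secret_matched : List Bool) (guess_matched : List Bool) (code_length : Int) : Decidable (Pre_get_partial_matches player_guess secret_code secret_matched guess_matched code_length) := by unfold Pre_get_partial_matches; infer_instance

def pvWitness_get_partial_matches : List Int × List Int × List Bool × List Bool × Int :=
  ([1, 2, 3], [3, 1, 2], [false, false, false], [false, false, false], 3)

def Spec_get_partial_matches (player_guess : List Int) (secret_code : List Int) (secret_matched : List Bool) (guess_matched : List Bool) (code_length : Int) (out : Int) : Prop := out = get_partial_matches_alt player_guess secret_code secret_matched guess_matched code_length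
instance (player_guess : List Int) (secret_code : List Int) (secret_matched : List Bool) (guess_matched : List Bool) (code_length : Int) (out : Int) : Decidable (Spec_get_partial_matches player_guess secret_code secret_matched guess_matched code_length out) := by unfold Spec_get_partial_matches; infer_instance

-- ===== CLAIM (what is proved, stated in full; the proofs are below) =====
def Claim_equal_get_partial_matches : Prop := ∀ (player_guess : List Int) (secret_code : List Int) (secret_matched : List Bool) (guess_matched : List Bool) (code_length : Int), Dom_get_partial_matches player_guess secret_code secret_matched guess_matched code_length → Pre_get_partial_matches player_guess secret_code secret_matched guess_matched code_length → Spec_get_partial_matches player_guess secret_code secret_matched guess_matched code_length (get_partial_matches player_guess secret_code secret_matched guess_matched code_length)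

-- ===== LEMMAS AND PROOFS =====

-- the unmatched secret values, in order
def pvAvail (z : List (Int × Bool)) : List Int :=
  z.filterMap (fun p => if p.2 then none else some p.1)

-- common greedy reference: scan the (guess value, guess flag) pairs, consuming
-- the first occurrence of each matched value from the avail list
def pvGreedy : List (Int × Bool) → List Int → Int
  | [], _ => 0
  | (v, b) :: rest, L =>
    if b then pvGreedy rest L
    else if v ∈ L then 1 + pvGreedy rest (L.erase v) else pvGreedy rest L

-- index of the first unmatched pair with value v
def pvFirstJ (v : Int) : List (Int × Bool) → Option Nat
  | [] => none
  | p :: t => if !p.2 && p.1 == v then some 0 else (pvFirstJ v t).map (· + 1)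

theorem pvAvail_nil : pvAvail [] = [] := rfl

theorem pvAvail_cons (w : Int) (b : Bool) (t : List (Int × Bool)) :
    pvAvail ((w, b) :: t) = if b then pvAvail t else w :: pvAvail t := by
  cases b <;> rfl

theorem pvAvail_mem (v : Int) (z : List (Int × Bool)) :
    v ∈ pvAvail z ↔ (v, false) ∈ z := by
  induction z with
  | nil => simp [pvAvail_nil]
  | cons p t ih =>
    obtain ⟨w, b⟩ := p
    cases b <;> simp [pvAvail_cons, ih, Prod.ext_iff]

theorem pvFirstJ_none (v : Int) (z : List (Int × Bool)) :
    pvFirstJ v z = none ↔ v ∉ pvAvail z := by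
  rw [show (v ∉ pvAvail z ↔ (v, false) ∉ z) from not_congr (pvAvail_mem v z)]
  induction z with
  | nil => simp [pvFirstJ]
  | cons p t ih =>
    obtain ⟨w, b⟩ := p
    by_cases hc : (!b && (w == v)) = true
    · simp only [Bool.and_eq_true, Bool.not_eq_eq_eq_not, Bool.not_true, beq_iff_eq] at hc
      obtain ⟨rfl, rfl⟩ := hc
      simp [pvFirstJ]
    · simp only [pvFirstJ, hc, if_neg, Bool.not_eq_true] at ih ⊢
      simp only [Bool.and_eq_true, Bool.not_eq_eq_eq_not, Bool.not_true, beq_iff_eq,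
        not_and] at hc
      rw [Option.map_eq_none_iff, ih]
      constructor
      · intro h hmem
        rcases List.mem_cons.1 hmem with heq | hmem'
        · cases heq
          exact hc rfl rfl
        · exact h hmem'
      · intro h hmem
        exact h (List.mem_cons_of_mem _ hmem)

theorem pvFirstJ_some (v : Int) (z : List (Int × Bool)) (k : Nat)
    (h : pvFirstJ v z = some k) :
    k < z.length ∧ z[k]? = some (v, false) ∧
      pvAvail (z.set k (v, true)) = (pvAvail z).erase v := by
  induction z generalizing k with
  | nil => simp [pvFirstJ] at h
  | cons p t ih =>
    obtain ⟨w, b⟩ := p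
    by_cases hc : (!b && (w == v)) = true
    · simp only [pvFirstJ, hc, if_pos] at h
      simp only [Bool.and_eq_true, Bool.not_eq_eq_eq_not, Bool.not_true, beq_iff_eq] at hc
      obtain ⟨rfl, rfl⟩ := hc
      cases h
      refine ⟨by simp, by simp, ?_⟩
      simp [pvAvail, List.erase_cons_head]
    · simp only [pvFirstJ, hc, if_neg, Bool.not_eq_true] at h
      rcases Option.map_eq_some_iff.1 h with ⟨k', hk', rfl⟩
      obtain ⟨h1, h2, h3⟩ := ih k' hk'
      refine ⟨by simpa using h1, by simpa using h2, ?_⟩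
      have hnv : ¬(b = false ∧ w = v) := by
        simpa [Bool.and_eq_true] using hc
      cases b
      · have hwv : w ≠ v := fun hw => hnv ⟨rfl, hw⟩
        simp [pvAvail, List.set_cons_succ, List.erase_cons_tail, hwv] at h3 ⊢
        simpa [pvAvail] using h3
      · simp [pvAvail, List.set_cons_succ] at h3 ⊢
        simpa [pvAvail] using h3

theorem pvInnerA_eq (v : Int) (sc : List Int) (cl : Int)
    (hs : cl.toNat ≤ sc.length) :
    ∀ (a : Nat) (sm : List Bool), cl.toNat ≤ sm.length → a ≤ cl.toNat →
    pvInnerA v sc sm (PySem.List.pyRange (a : Int) cl 1)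
      = (pvFirstJ v (((sc.zip sm).drop a).take (cl.toNat - a))).map
          (fun k => sm.set (a + k) true) := by
  intro a
  induction hd : cl.toNat - a generalizing a with
  | zero =>
    intro sm hm ha
    have hnil : PySem.List.pyRange (a : Int) cl 1 = [] :=
      PySem.List.pyRange_one_eq_nil (by omega)
    rw [hnil]
    simp [pvInnerA, pvFirstJ]
  | succ m ih =>
    intro sm hm ha
    have halt : a < cl.toNat := by omega
    have hcons : PySem.List.pyRange (a : Int) cl 1
        = (a : Int) :: PySem.List.pyRange ((a : Int) + 1) cl 1 :=
      PySem.List.pyRange_one_cons (by omega)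
    have hza : a < (sc.zip sm).length := by simp [List.length_zip]; omega
    have hdropz : (sc.zip sm).drop a
        = (sc[a]'(by omega), sm[a]'(by omega)) :: (sc.zip sm).drop (a + 1) := by
      have h := (List.drop_eq_getElem_cons hza).symm
      rw [List.getElem_zip] at h
      exact h.symm
    have hgm : PySem.List.pyGetD sm (a : Int) false = sm[a]'(by omega) := by
      rw [PySem.List.pyGetD_natCast]; exact List.getD_eq_getElem _ _ (by omega)
    have hgs : PySem.List.pyGetD sc (a : Int) 0 = sc[a]'(by omega) := by
      rw [PySem.List.pyGetD_natCast]; exact List.getD_eq_getElem _ _ (by omega)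
    rw [hcons]
    show (if (!(PySem.List.pyGetD sm (a : Int) false)
            && (PySem.List.pyGetD sc (a : Int) 0 == v)) = true then
          some (PySem.List.pySetD sm (a : Int) true)
        else pvInnerA v sc sm (PySem.List.pyRange ((a : Int) + 1) cl 1)) = _
    rw [hgm, hgs, hdropz]
    rw [List.take_succ_cons]
    by_cases hc : (!sm[a]'(by omega) && (sc[a]'(by omega) == v)) = true
    · rw [if_pos hc]
      show _ = (if (!(sm[a]'(by omega), sm[a]'(by omega)).2
          && ((sc[a]'(by omega), sm[a]'(by omega)).1 == v)) = true then some 0 else _).map _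
      simp only [hc, if_pos]
      simp [PySem.List.pySetD_natCast]
    · rw [if_neg hc]
      have hcast : ((a : Int) + 1) = ((a + 1 : Nat) : Int) := by push_cast; ring
      rw [hcast, ih (a + 1) (by omega) sm hm (by omega)]
      show _ = (if (!(sm[a]'(by omega), sm[a]'(by omega)).2
          && ((sc[a]'(by omega), sm[a]'(by omega)).1 == v)) = true then some 0
        else (pvFirstJ v _).map (· + 1)).map _
      simp only [hc, if_neg, Bool.not_eq_true]
      rw [Option.map_map]
      cases pvFirstJ v (((sc.zip sm).drop (a + 1)).take m) with
      | none => simp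
      | some k =>
        simp only [Option.map_some, Function.comp]
        congr 2
        omega

theorem pvZipSet (s : List Int) (m : List Bool) (k : Nat) (hk : k < s.length)
    (hk2 : k < m.length) :
    s.zip (m.set k true) = (s.zip m).set k (s[k]'hk, true) := by
  apply List.ext_getElem
  · simp
  · intro i h1 h2
    simp only [List.getElem_zip, List.getElem_set]
    split <;> simp_all

theorem pvOuterA_eq (pg sc : List Int) (cl : Int)
    (hs : cl.toNat ≤ sc.length) (hg : cl.toNat ≤ pg.length) :
    ∀ (a : Nat) (cnt : Int) (sm gm : List Bool), cl.toNat ≤ sm.length →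
      cl.toNat ≤ gm.length → a ≤ cl.toNat →
    (pvOuterA pg sc cl (cnt, sm, gm) (PySem.List.pyRange (a : Int) cl 1)).1
      = cnt + pvGreedy (((pg.zip gm).drop a).take (cl.toNat - a))
          (pvAvail ((sc.zip sm).take cl.toNat)) := by
  intro a
  induction hd : cl.toNat - a generalizing a with
  | zero =>
    intro cnt sm gm hm hgm ha
    rw [PySem.List.pyRange_one_eq_nil (by omega)]
    simp [pvOuterA, pvGreedy]
  | succ m ih =>
    intro cnt sm gm hm hgml ha
    have halt : a < cl.toNat := by omega
    rw [PySem.List.pyRange_one_cons (by omega)]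
    have hza : a < (pg.zip gm).length := by simp [List.length_zip]; omega
    have hdropw : (pg.zip gm).drop a
        = (pg[a]'(by omega), gm[a]'(by omega)) :: (pg.zip gm).drop (a + 1) := by
      have h := (List.drop_eq_getElem_cons hza).symm
      rw [List.getElem_zip] at h
      exact h.symm
    have hgmr : PySem.List.pyGetD gm (a : Int) false = gm[a]'(by omega) := by
      rw [PySem.List.pyGetD_natCast]; exact List.getD_eq_getElem _ _ (by omega)
    have hgv : PySem.List.pyGetD pg (a : Int) 0 = pg[a]'(by omega) := by
      rw [PySem.List.pyGetD_natCast]; exact List.getD_eq_getElem _ _ (by omega)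
    have hcast : ((a : Int) + 1) = ((a + 1 : Nat) : Int) := by push_cast; ring
    rw [hdropw, List.take_succ_cons]
    simp only [pvOuterA, hgmr, hgv]
    by_cases hb : gm[a]'(by omega) = true
    · rw [if_pos hb, hcast, ih (a + 1) (by omega) cnt sm gm hm hgml (by omega)]
      rw [hb]
      simp [pvGreedy]
    · have hb' : gm[a]'(by omega) = false := by simpa using hb
      rw [if_neg hb, hb']
      have hinner : pvInnerA (pg[a]'(by omega)) sc sm (PySem.List.pyRange 0 cl 1)
          = (pvFirstJ (pg[a]'(by omega)) ((sc.zip sm).take cl.toNat)).map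
              (fun k => sm.set k true) := by
        have h := pvInnerA_eq (pg[a]'(by omega)) sc cl hs 0 sm hm (by omega)
        simpa using h
      rw [hinner]
      cases hf : pvFirstJ (pg[a]'(by omega)) ((sc.zip sm).take cl.toNat) with
      | none =>
        simp only [Option.map_none]
        rw [hcast, ih (a + 1) (by omega) cnt sm gm hm hgml (by omega)]
        have hnm : pg[a]'(by omega) ∉ pvAvail ((sc.zip sm).take cl.toNat) :=
          (pvFirstJ_none _ _).1 hf
        simp [pvGreedy, hnm]
      | some k =>
        simp only [Option.map_some]
        obtain ⟨hk, hkz, herase⟩ := pvFirstJ_some _ _ _ hf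
        have hkn : k < cl.toNat := by
          have := hk; simp [List.length_take, List.length_zip] at this; omega
        have hksc : k < sc.length := by omega
        have hksm : k < sm.length := by omega
        have hzk : ((sc.zip sm).take cl.toNat)[k]'hk = (sc[k]'hksc, sm[k]'hksm) := by
          rw [List.getElem_take, List.getElem_zip]
        have hkz' := hkz
        rw [List.getElem?_eq_getElem hk, hzk] at hkz'
        simp only [Option.some.injEq, Prod.mk.injEq] at hkz'
        have hscv : sc[k]'hksc = pg[a]'(by omega) := hkz'.1
        have hsmf : sm[k]'hksm = false := hkz'.2
        have hzset : (sc.zip (sm.set k true)).take cl.toNat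
            = ((sc.zip sm).take cl.toNat).set k (pg[a]'(by omega), true) := by
          rw [pvZipSet sc sm k hksc hksm, List.take_set, hscv]
        have hmem : pg[a]'(by omega) ∈ pvAvail ((sc.zip sm).take cl.toNat) := by
          rw [pvAvail_mem]
          have : (pg[a]'(by omega), false) = ((sc.zip sm).take cl.toNat)[k]'hk := by
            rw [hzk, hscv, hsmf]
          rw [this]
          exact List.getElem_mem hk
        have hgmset : (pg.zip (PySem.List.pySetD gm (a : Int) true)).drop (a + 1)
            = (pg.zip gm).drop (a + 1) := by
          rw [PySem.List.pySetD_natCast, pvZipSet pg gm a (by omega) (by omega)]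
          exact List.drop_set_of_lt (by omega)
        rw [hcast, ih (a + 1) (by omega) (cnt + 1) (sm.set k true)
          (PySem.List.pySetD gm (a : Int) true) (by simpa using hm)
          (by rw [PySem.List.pySetD_natCast]; simpa using hgml) (by omega)]
        rw [hgmset, hzset, herase]
        simp [pvGreedy, hmem]
        ring

theorem pvBridge {σ : Type} (f : σ → Int → Bool → σ) (s : List Int) (ml : List Bool)
    (cl : Int) (hs : cl.toNat ≤ s.length) (hm : cl.toNat ≤ ml.length) :
    ∀ (a : Nat) (init : σ), a ≤ cl.toNat →
    (PySem.List.pyRange (a : Int) cl 1).foldl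
        (fun st j => f st (PySem.List.pyGetD s j 0) (PySem.List.pyGetD ml j false)) init
      = (((s.zip ml).drop a).take (cl.toNat - a)).foldl (fun st p => f st p.1 p.2) init := by
  intro a
  induction hd : cl.toNat - a generalizing a with
  | zero =>
    intro init ha
    rw [PySem.List.pyRange_one_eq_nil (by omega)]
    simp
  | succ m ih =>
    intro init ha
    have halt : a < cl.toNat := by omega
    rw [PySem.List.pyRange_one_cons (by omega)]
    have hza : a < (s.zip ml).length := by simp [List.length_zip]; omega
    have hdropw : (s.zip ml).drop a
        = (s[a]'(by omega), ml[a]'(by omega)) :: (s.zip ml).drop (a + 1) := by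
      have h := (List.drop_eq_getElem_cons hza).symm
      rw [List.getElem_zip] at h
      exact h.symm
    have hgs : PySem.List.pyGetD s (a : Int) 0 = s[a]'(by omega) := by
      rw [PySem.List.pyGetD_natCast]; exact List.getD_eq_getElem _ _ (by omega)
    have hgm : PySem.List.pyGetD ml (a : Int) false = ml[a]'(by omega) := by
      rw [PySem.List.pyGetD_natCast]; exact List.getD_eq_getElem _ _ (by omega)
    have hcast : ((a : Int) + 1) = ((a + 1 : Nat) : Int) := by push_cast; ring
    rw [hdropw, List.take_succ_cons, List.foldl_cons, List.foldl_cons, hgs, hgm,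
      hcast, ih (a + 1) (by omega) _ (by omega)]

theorem pvCountsFold (z : List (Int × Bool)) :
    ∀ (c : PySem.Dict Int Int),
    z.foldl (fun c p => if !p.2 then c.insert p.1 (c.getD p.1 0 + 1) else c) c
      = (pvAvail z).foldl (fun c x => c.insert x (c.getD x 0 + 1)) c := by
  induction z with
  | nil => intro c; rfl
  | cons p t ih =>
    intro c
    obtain ⟨w, b⟩ := p
    cases b <;> exact ih _

theorem pvCountsB_getD (sc : List Int) (sm : List Bool) (cl : Int)
    (hs : cl.toNat ≤ sc.length) (hm : cl.toNat ≤ sm.length) (v : Int) :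
    (pvCountsB sc sm cl).getD v 0
      = ((pvAvail ((sc.zip sm).take cl.toNat)).count v : Int) := by
  unfold pvCountsB
  have hb := pvBridge
    (fun (c : PySem.Dict Int Int) val flag =>
      if !flag then c.insert val (c.getD val 0 + 1) else c)
    sc sm cl hs hm 0 PySem.Dict.empty (by omega)
  simp only [Nat.cast_zero, List.drop_zero, Nat.sub_zero] at hb
  rw [hb, pvCountsFold, PySem.Dict.getD_foldl_insert_add_one, PySem.Dict.getD_empty]
  ring

def pvStepB (st : Int × PySem.Dict Int Int) (v : Int) (b : Bool) :
    Int × PySem.Dict Int Int :=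
  if !b then
    (if st.2.getD v 0 > 0 then (st.1 + 1, st.2.insert v (st.2.getD v 0 - 1)) else st)
  else st

theorem pvLoopB (pairs : List (Int × Bool)) :
    ∀ (L : List Int) (c : PySem.Dict Int Int) (cnt : Int),
    (∀ v, c.getD v 0 = (L.count v : Int)) →
    (pairs.foldl (fun st p => pvStepB st p.1 p.2) (cnt, c)).1
      = cnt + pvGreedy pairs L := by
  induction pairs with
  | nil => intro L c cnt hinv; simp [pvGreedy]
  | cons p t ih =>
    intro L c cnt hinv
    obtain ⟨v, b⟩ := p
    rw [List.foldl_cons]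
    cases b
    · by_cases hvm : v ∈ L
      · have hpos : (0 : Int) < c.getD v 0 := by
          rw [hinv v]
          exact_mod_cast List.count_pos_iff.2 hvm
        have hstep : pvStepB (cnt, c) v false
            = (cnt + 1, c.insert v (c.getD v 0 - 1)) := by
          simp [pvStepB, hpos]
        rw [hstep]
        have hinv' : ∀ w, (c.insert v (c.getD v 0 - 1)).getD w 0
            = ((L.erase v).count w : Int) := by
          intro w
          rw [PySem.Dict.getD_insert, List.count_erase]
          by_cases hw : w = v
          · subst hw
            have h1 : 1 ≤ L.count w := List.count_pos_iff.2 hvm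
            simp only [beq_self_eq_true, if_true]
            rw [hinv w]
            omega
          · have hbeq : (v == w) = false := by simp [Ne.symm hw]
            simp [hw, hbeq, hinv w]
        rw [ih (L.erase v) _ _ hinv']
        simp [pvGreedy, hvm]
        ring
      · have hz : c.getD v 0 = 0 := by
          rw [hinv v]
          simp [List.count_eq_zero_of_not_mem hvm]
        have hstep : pvStepB (cnt, c) v false = (cnt, c) := by
          simp [pvStepB, hz]
        rw [hstep, ih L c cnt hinv]
        simp [pvGreedy, hvm]
    · have hstep : pvStepB (cnt, c) v true = (cnt, c) := by simp [pvStepB]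
      rw [hstep, ih L c cnt hinv]
      simp [pvGreedy]

-- ===== VERDICT (by name: the statement is the Claim_ definition above) =====
theorem get_partial_matches_spec : Claim_equal_get_partial_matches := by
  intro pg sc sm gm cl _ hpre
  obtain ⟨h1, h2, h3, h4⟩ := hpre
  have hpg : cl.toNat ≤ pg.length := by omega
  have hsc : cl.toNat ≤ sc.length := by omega
  have hsm : cl.toNat ≤ sm.length := by omega
  have hgm : cl.toNat ≤ gm.length := by omega
  unfold Spec_get_partial_matches get_partial_matches get_partial_matches_alt
  have hA := pvOuterA_eq pg sc cl hsc hpg 0 0 sm gm hsm hgm (by omega)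
  simp only [Nat.cast_zero, List.drop_zero, Nat.sub_zero] at hA
  rw [hA]
  have hBeq : ((PySem.List.pyRange 0 cl 1).foldl (fun (st : Int × PySem.Dict Int Int) i =>
      if !(PySem.List.pyGetD gm i false) then
        if st.2.getD (PySem.List.pyGetD pg i 0) 0 > 0 then
          (st.1 + 1, st.2.insert (PySem.List.pyGetD pg i 0)
                        (st.2.getD (PySem.List.pyGetD pg i 0) 0 - 1))
        else st
      else st)
    (0, pvCountsB sc sm cl)).1
      = ((PySem.List.pyRange 0 cl 1).foldl (fun st j =>
          pvStepB st (PySem.List.pyGetD pg j 0) (PySem.List.pyGetD gm j false))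
        (0, pvCountsB sc sm cl)).1 := rfl
  rw [hBeq]
  have hB := pvBridge pvStepB pg gm cl hpg hgm 0 (0, pvCountsB sc sm cl) (by omega)
  simp only [Nat.cast_zero, List.drop_zero, Nat.sub_zero] at hB
  rw [hB]
  rw [pvLoopB ((pg.zip gm).take cl.toNat) (pvAvail ((sc.zip sm).take cl.toNat))
    (pvCountsB sc sm cl) 0 (fun v => pvCountsB_getD sc sm cl hsc hsm v)]
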